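-- pv_equiv track=rewrite | github.com/martingms/aoc | 2020/day9.py | weakness
-- ===== SOURCE A (Python) =====
-- def weakness(nums, invalid):
--     for i in range(len(nums)):
--         for j in range(i+2, len(nums)):
--             s = sum(nums[i:j])
--             if s == invalid:
--                 return min(nums[i:j]) + max(nums[i:j])
--             if s > invalid:
--                 break
-- ===== SOURCE B (Python) =====
-- def weakness(nums, invalid):
--     # Running-accumulator version: for each start index, extend the window one
--     # element at a time, maintaining the sum, min and max incrementally instead
--     # of recomputing them from slices each step. Same search order and stopping
--     # rule as A (windows of length >= 2 that never include the last element).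
--     n = len(nums)
--     for i in range(n):
--         s = mn = mx = nums[i]
--         for j in range(i + 1, n - 1):
--             x = nums[j]
--             s += x
--             if x < mn:
--                 mn = x
--             if x > mx:
--                 mx = x
--             if s == invalid:
--                 return mn + mx
--             if s > invalid:
--                 break
--     return None
-- ===== Notes on version B (the rewrite author's own statement) =====
-- stated objective: alternative
-- what changed: B maintains a running sum, minimum and maximum while extending each window one element at a time, instead of A's recomputation of sum(nums[i:j]) (and min/max of the slice) from scratch for every window, removing the inner per-window scan.
import Mathlib
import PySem

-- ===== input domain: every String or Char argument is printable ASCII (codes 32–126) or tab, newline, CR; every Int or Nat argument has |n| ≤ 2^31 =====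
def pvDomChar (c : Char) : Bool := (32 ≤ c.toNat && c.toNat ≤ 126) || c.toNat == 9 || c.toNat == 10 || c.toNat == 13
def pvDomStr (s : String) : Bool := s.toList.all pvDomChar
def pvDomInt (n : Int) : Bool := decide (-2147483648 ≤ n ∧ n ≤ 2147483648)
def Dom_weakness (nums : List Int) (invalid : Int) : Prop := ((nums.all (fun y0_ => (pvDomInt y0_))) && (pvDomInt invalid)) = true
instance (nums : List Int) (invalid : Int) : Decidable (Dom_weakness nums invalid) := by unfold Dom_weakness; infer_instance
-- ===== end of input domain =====

-- B replaces A's per-window slice/sum/min/max recomputation by running accumulators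
-- maintained while the window grows (objective: alternative; same search order and results).

-- ===== PORT A =====
-- inner loop: for j in range(i+2, len(nums)): s = sum(nums[i:j]); …
def weaknessInnerA (nums : List Int) (invalid : Int) (i : Int) : List Int → Option Int
  | [] => none
  | j :: rest =>
    let win := PySem.List.slice nums (some i) (some j)
    let s := win.sum
    if s = invalid then
      match PySem.List.min? win (fun y => y), PySem.List.max? win (fun y => y) with
      | some mn, some mx => some (mn + mx)
      | _, _ => none  -- unreachable: the slice is nonempty whenever this branch runs
    else if s > invalid then none  -- break
    else weaknessInnerA nums invalid i rest

-- outer loop: for i in range(len(nums)): …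
def weaknessOuterA (nums : List Int) (invalid : Int) : List Int → Option Int
  | [] => none
  | i :: rest =>
    match weaknessInnerA nums invalid i (PySem.List.pyRange (i + 2) (nums.length : Int) 1) with
    | some v => some v   -- the inner loop returned
    | none => weaknessOuterA nums invalid rest

def weakness (nums : List Int) (invalid : Int) : Option Int :=
  weaknessOuterA nums invalid (PySem.List.pyRange 0 (nums.length : Int) 1)

-- ===== PORT B =====
-- inner loop of Source B: extend the window, updating running sum / min / max
def weaknessInnerB (nums : List Int) (invalid : Int) (s mn mx : Int) : List Int → Option Int
  | [] => none
  | j :: rest =>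
    match PySem.List.pyGet? nums j with
    | none => none  -- unreachable: j always in range
    | some x =>
      let s' := s + x
      let mn' := if x < mn then x else mn
      let mx' := if x > mx then x else mx
      if s' = invalid then some (mn' + mx')
      else if s' > invalid then none  -- break
      else weaknessInnerB nums invalid s' mn' mx' rest

-- outer loop of Source B: for i in range(n): s = mn = mx = nums[i]; …
def weaknessOuterB (nums : List Int) (invalid : Int) : List Int → Option Int
  | [] => none
  | i :: rest =>
    match PySem.List.pyGet? nums i with
    | none => none  -- unreachable: i always in range
    | some x0 =>
      match weaknessInnerB nums invalid x0 x0 x0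
          (PySem.List.pyRange (i + 1) ((nums.length : Int) - 1) 1) with
      | some v => some v
      | none => weaknessOuterB nums invalid rest

def weakness_alt (nums : List Int) (invalid : Int) : Option Int :=
  weaknessOuterB nums invalid (PySem.List.pyRange 0 (nums.length : Int) 1)

-- ===== PRECONDITION & SPEC =====
def Spec_weakness (nums : List Int) (invalid : Int) (out : Option Int) : Prop := out = weakness_alt nums invalid
instance (nums : List Int) (invalid : Int) (out : Option Int) : Decidable (Spec_weakness nums invalid out) := by unfold Spec_weakness; infer_instance

-- ===== CLAIM (what is proved, stated in full; the proofs are below) =====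
def Claim_equal_weakness : Prop := ∀ (nums : List Int) (invalid : Int), Dom_weakness nums invalid → Spec_weakness nums invalid (weakness nums invalid)

-- ===== LEMMAS AND PROOFS =====

-- appending the next element to a window slice
lemma slice_snoc (nums : List Int) (i a : Nat) (h1 : i < a) (h2 : a ≤ nums.length)
    (ha : a - 1 < nums.length) :
    PySem.List.slice nums (some (i : Int)) (some (a : Int))
      = PySem.List.slice nums (some (i : Int)) (some ((a : Int) - 1)) ++ [nums[a - 1]] := by
  have hc : ((a : Int) - 1) = ((a - 1 : Nat) : Int) := by omega
  rw [hc, PySem.List.slice_natCast, PySem.List.slice_natCast]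
  have hlen : a - 1 - i < (nums.drop i).length := by simp; omega
  have : a - i = (a - 1 - i) + 1 := by omega
  rw [this, List.take_add_one]
  congr 1
  rw [List.getElem?_eq_getElem hlen]
  simp [List.getElem_drop]
  congr 1
  omega

lemma min?_snoc (w : List Int) (x mn : Int)
    (h : PySem.List.min? w (fun y => y) = some mn) :
    PySem.List.min? (w ++ [x]) (fun y => y) = some (if x < mn then x else mn) := by
  cases w with
  | nil => simp [PySem.List.min?] at h
  | cons y t =>
    rw [PySem.List.min?_id_cons] at h
    rw [List.cons_append, PySem.List.min?_id_cons, List.foldl_append]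
    simp only [List.foldl_cons, List.foldl_nil]
    injection h with h
    rw [h]
    rcases lt_or_ge x mn with h' | h' <;> simp [min_def] <;> omega

lemma max?_snoc (w : List Int) (x mx : Int)
    (h : PySem.List.max? w (fun y => y) = some mx) :
    PySem.List.max? (w ++ [x]) (fun y => y) = some (if x > mx then x else mx) := by
  cases w with
  | nil => simp [PySem.List.max?] at h
  | cons y t =>
    rw [PySem.List.max?_id_cons] at h
    rw [List.cons_append, PySem.List.max?_id_cons, List.foldl_append]
    simp only [List.foldl_cons, List.foldl_nil]
    injection h with h
    rw [h]
    rcases lt_or_ge mx x with h' | h' <;> simp [max_def] <;> omega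

-- the inner loops agree: A's window index j corresponds to B's end index j-1,
-- and B's accumulators are the sum/min/max of the current window slice.
lemma inner_eq (nums : List Int) (invalid : Int) (i : Nat) :
    ∀ (k a : Nat), nums.length - a = k → i + 2 ≤ a →
    ∀ (s mn mx : Int),
    s = (PySem.List.slice nums (some (i : Int)) (some ((a : Int) - 1))).sum →
    PySem.List.min? (PySem.List.slice nums (some (i : Int)) (some ((a : Int) - 1))) (fun y => y) = some mn →
    PySem.List.max? (PySem.List.slice nums (some (i : Int)) (some ((a : Int) - 1))) (fun y => y) = some mx →
    weaknessInnerA nums invalid (i : Int) (PySem.List.pyRange (a : Int) (nums.length : Int) 1)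
      = weaknessInnerB nums invalid s mn mx (PySem.List.pyRange ((a : Int) - 1) ((nums.length : Int) - 1) 1) := by
  intro k
  induction k with
  | zero =>
    intro a hk ha s mn mx hs hmn hmx
    rw [PySem.List.pyRange_one_eq_nil (by omega), PySem.List.pyRange_one_eq_nil (by omega)]
    rfl
  | succ k ih =>
    intro a hk ha s mn mx hs hmn hmx
    have haln : a < nums.length := by omega
    rw [PySem.List.pyRange_one_cons (a := (a:Int)) (b := (nums.length:Int)) (by exact_mod_cast haln),
        PySem.List.pyRange_one_cons (a := (a:Int)-1) (b := (nums.length:Int)-1) (by omega)]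
    rw [weaknessInnerA, weaknessInnerB]
    have hgets : PySem.List.pyGet? nums ((a : Int) - 1) = some nums[a - 1] := by
      have hc : ((a : Int) - 1) = ((a - 1 : Nat) : Int) := by omega
      rw [hc]
      simp [pysem]
      try omega
    rw [hgets]
    have hwin : PySem.List.slice nums (some (i : Int)) (some (a : Int))
        = PySem.List.slice nums (some (i : Int)) (some ((a : Int) - 1)) ++ [nums[a - 1]] :=
      slice_snoc nums i a (by omega) (by omega) (by omega)
    simp only [hwin]
    set x := nums[a - 1] with hx
    set w := PySem.List.slice nums (some (i : Int)) (some ((a : Int) - 1)) with hw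
    have hsum : (w ++ [x]).sum = s + x := by
      rw [List.sum_append, List.sum_singleton, hs]
    rw [hsum, min?_snoc w x mn hmn, max?_snoc w x mx hmx]
    by_cases h1 : s + x = invalid
    · simp [h1]
    · simp only [h1, if_false]
      by_cases h2 : s + x > invalid
      · simp [h2]
      · simp only [h2, if_false]
        have heq1 : (a : Int) + 1 = ((a + 1 : Nat) : Int) := by push_cast; ring
        have heq2 : ((a : Int) - 1) + 1 = ((a + 1 : Nat) : Int) - 1 := by push_cast; ring
        rw [heq1, heq2]
        apply ih (a + 1) (by omega) (by omega)
        · have : ((a + 1 : Nat) : Int) - 1 = ((a : Nat) : Int) := by push_cast; ring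
          rw [this, hwin, hsum]
        · have : ((a + 1 : Nat) : Int) - 1 = ((a : Nat) : Int) := by push_cast; ring
          rw [this, hwin]; exact min?_snoc w x mn hmn
        · have : ((a + 1 : Nat) : Int) - 1 = ((a : Nat) : Int) := by push_cast; ring
          rw [this, hwin]; exact max?_snoc w x mx hmx

-- the outer loops agree from any start index
lemma outer_eq (nums : List Int) (invalid : Int) :
    ∀ (k i : Nat), nums.length - i = k →
    weaknessOuterA nums invalid (PySem.List.pyRange (i : Int) (nums.length : Int) 1)
      = weaknessOuterB nums invalid (PySem.List.pyRange (i : Int) (nums.length : Int) 1) := by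
  intro k
  induction k with
  | zero =>
    intro i hk
    rw [PySem.List.pyRange_one_eq_nil (by omega)]
    rfl
  | succ k ih =>
    intro i hk
    have hiln : i < nums.length := by omega
    rw [PySem.List.pyRange_one_cons (a := (i:Int)) (b := (nums.length:Int)) (by exact_mod_cast hiln)]
    rw [weaknessOuterA, weaknessOuterB]
    have hget : PySem.List.pyGet? nums (i : Int) = some nums[i] := by
      simp [pysem, hiln]
    rw [hget]
    have hw1 : PySem.List.slice nums (some (i : Int)) (some (((i + 2 : Nat) : Int) - 1)) = [nums[i]] := by
      have hc : ((i + 2 : Nat) : Int) - 1 = ((i + 1 : Nat) : Int) := by push_cast; ring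
      have hd : nums.drop i = nums[i] :: nums.drop (i + 1) := List.drop_eq_getElem_cons hiln
      have h1 : i + 1 - i = 1 := by omega
      rw [hc, PySem.List.slice_natCast, h1, hd]
      rfl
    have hinner :
        weaknessInnerA nums invalid (i : Int) (PySem.List.pyRange ((i : Int) + 2) (nums.length : Int) 1)
          = weaknessInnerB nums invalid nums[i] nums[i] nums[i]
              (PySem.List.pyRange ((i : Int) + 1) ((nums.length : Int) - 1) 1) := by
      have hc2 : ((i : Int) + 2) = ((i + 2 : Nat) : Int) := by push_cast; ring
      have hc3 : ((i : Int) + 1) = ((i + 2 : Nat) : Int) - 1 := by push_cast; ring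
      rw [hc2, hc3]
      apply inner_eq nums invalid i (nums.length - (i + 2)) (i + 2) rfl (by omega)
      · rw [hw1]; simp
      · rw [hw1]; simp [PySem.List.min?]
      · rw [hw1]; simp [PySem.List.max?]
    show (match weaknessInnerA nums invalid (i : Int) (PySem.List.pyRange ((i : Int) + 2) (nums.length : Int) 1) with
          | some v => some v
          | none => weaknessOuterA nums invalid (PySem.List.pyRange ((i : Int) + 1) (nums.length : Int) 1))
        = (match weaknessInnerB nums invalid nums[i] nums[i] nums[i] (PySem.List.pyRange ((i : Int) + 1) ((nums.length : Int) - 1) 1) with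
          | some v => some v
          | none => weaknessOuterB nums invalid (PySem.List.pyRange ((i : Int) + 1) (nums.length : Int) 1))
    rw [hinner]
    cases hres : weaknessInnerB nums invalid nums[i] nums[i] nums[i]
        (PySem.List.pyRange ((i : Int) + 1) ((nums.length : Int) - 1) 1) with
    | some v => rfl
    | none =>
      simp only []
      have hc : (i : Int) + 1 = ((i + 1 : Nat) : Int) := by push_cast; ring
      rw [hc]
      exact ih (i + 1) (by omega)

-- ===== VERDICT (by name: the statement is the Claim_ definition above) =====
theorem weakness_spec : Claim_equal_weakness := by
  intro nums invalid _
  unfold Spec_weakness weakness weakness_alt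
  exact_mod_cast outer_eq nums invalid nums.length 0 (by omega)
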